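-- pv_equiv track=rewrite | github.com/AP-MI-2021/lab-3-dariussandru | main.py | get_longest_all_palindromes
-- ===== SOURCE A (Python) =====
-- def is_palindrome(n):
--     """
--     :param copie: retinem nr n
--     :param invers: formam inversul numarului n
--     :param n: numarul pe care il verificam daca este palindrom
--     :return: true daca nr este palindrom sau false in caz contrar
--     """
--     copie = n
--     invers = 0
--     while copie > 0:
--         invers = invers * 10 + copie % 10
--         copie = copie // 10
--     if n == invers:
--         return True
--     else:
--         return False
--
-- def get_longest_all_palindromes(lista_principala):
--     """
--
--     :param lista_principala:
--     :return: cea mai lunga subsecventa de nr palindrome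
--     """
--     lungime_max = 0
--     lungime_actuala = 0
--     secventa_max = []
--     secventa_actuala = []
--     for n in lista_principala:
--         if is_palindrome(n):
--             lungime_actuala +=  1
--             secventa_actuala.append(n)
--         else:
--             if lungime_actuala > lungime_max:
--                 lungime_max = lungime_actuala
--                 secventa_max = secventa_actuala
--
--             lungime_actuala = 0
--             secventa_actuala = []
--
--     if lungime_actuala > lungime_max:
--         secventa_max = secventa_actuala
--
--     return secventa_max
-- ===== SOURCE B (Python) =====
-- def is_palindrome(n):
--     copie = n
--     invers = 0
--     while copie > 0:
--         invers = invers * 10 + copie % 10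
--         copie = copie // 10
--     return n == invers
--
-- def get_longest_all_palindromes(lista_principala):
--     # Collect every maximal run of palindromes, then pick the first longest.
--     runs = []
--     current = None
--     for n in lista_principala:
--         if is_palindrome(n):
--             if current is None:
--                 current = []
--                 runs.append(current)
--             current.append(n)
--         else:
--             current = None
--     return max(runs, key=len, default=[])
-- ===== Notes on version B (the rewrite author's own statement) =====
-- stated objective: alternative
-- what changed: A keeps a running best-run accumulator with length counters and updates the maximum on the fly; B first collects every maximal run of palindromes into a list of runs and then selects the first longest run with Python's max keyed by length (group-then-select decomposition).
import Mathlib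
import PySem

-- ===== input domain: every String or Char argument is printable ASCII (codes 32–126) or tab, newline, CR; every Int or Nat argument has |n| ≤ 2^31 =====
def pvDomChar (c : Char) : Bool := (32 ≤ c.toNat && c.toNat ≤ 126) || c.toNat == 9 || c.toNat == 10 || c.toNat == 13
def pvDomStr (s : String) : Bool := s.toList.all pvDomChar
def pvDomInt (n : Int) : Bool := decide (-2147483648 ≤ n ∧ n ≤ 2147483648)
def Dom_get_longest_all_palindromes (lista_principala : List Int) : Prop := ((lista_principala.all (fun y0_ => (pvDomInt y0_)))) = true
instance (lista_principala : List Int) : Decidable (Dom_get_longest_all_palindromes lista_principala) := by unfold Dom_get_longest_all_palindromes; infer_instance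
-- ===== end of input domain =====

-- B collects all maximal palindromic runs first and then picks the first longest run
-- with Python's max keyed by length; A maintains a running best with length counters.

-- ===== PORT A =====
-- shared helper: is_palindrome, identical in both Pythons
def pvPalLoop (copie invers : Int) : Int :=
  if h : copie > 0 then
    pvPalLoop (PySem.Int.floordiv copie 10) (invers * 10 + PySem.Int.mod copie 10)
  else invers
termination_by copie.toNat
decreasing_by
  have := PySem.Int.floordiv_eq_ediv_of_pos (a := copie) (b := 10) (by omega)
  omega

def is_palindrome (n : Int) : Bool :=
  let invers := pvPalLoop n 0
  if n == invers then true else false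

-- A's loop body (state: lungime_max, lungime_actuala, secventa_max, secventa_actuala)
def pvAstep (s : Int × Int × List Int × List Int) (n : Int) : Int × Int × List Int × List Int :=
  if is_palindrome n then
    (s.1, s.2.1 + 1, s.2.2.1, s.2.2.2 ++ [n])
  else
    if s.2.1 > s.1 then (s.2.1, 0, s.2.2.2, []) else (s.1, 0, s.2.2.1, [])

def get_longest_all_palindromes (lista_principala : List Int) : List Int :=
  let st := lista_principala.foldl pvAstep (0, 0, [], [])
  if st.2.1 > st.1 then st.2.2.2 else st.2.2.1

-- ===== PORT B =====
-- B's loop body. Python's `runs`/`current` alias the run being built; modelled as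
-- (completed runs, optional current run): Python's runs = acc ++ cur.toList.
def pvBstep (s : List (List Int) × Option (List Int)) (n : Int) : List (List Int) × Option (List Int) :=
  if is_palindrome n then
    (s.1, some (s.2.getD [] ++ [n]))
  else
    match s.2 with
    | some c => (s.1 ++ [c], none)
    | none => (s.1, none)

def get_longest_all_palindromes_alt (lista_principala : List Int) : List Int :=
  let st := lista_principala.foldl pvBstep ([], none)
  let runs := st.1 ++ st.2.toList
  PySem.List.maxD runs List.length []

-- ===== PRECONDITION & SPEC =====
def Spec_get_longest_all_palindromes (lista_principala : List Int) (out : List Int) : Prop := out = get_longest_all_palindromes_alt lista_principala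
instance (lista_principala : List Int) (out : List Int) : Decidable (Spec_get_longest_all_palindromes lista_principala out) := by unfold Spec_get_longest_all_palindromes; infer_instance

-- ===== CLAIM (what is proved, stated in full; the proofs are below) =====
def Claim_equal_get_longest_all_palindromes : Prop := ∀ (lista_principala : List Int), Dom_get_longest_all_palindromes lista_principala → Spec_get_longest_all_palindromes lista_principala (get_longest_all_palindromes lista_principala)

-- ===== LEMMAS AND PROOFS =====

-- "keep the longer, first wins ties" — the step of Python's max over runs
def pvPick (m g : List Int) : List Int := if m.length < g.length then g else m

lemma max?_cons_eq (t : List (List Int)) : ∀ m, PySem.List.max? (m :: t) List.length = some (t.foldl pvPick m) := by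
  induction t with
  | nil => intro m; simp [PySem.List.max?]
  | cons x t ih =>
      intro m
      have h1 := ih (pvPick m x)
      simp only [PySem.List.max?, List.foldl] at h1 ⊢
      rw [← h1]
      by_cases h : List.length m < List.length x <;> simp [pvPick, h]

lemma maxD_eq_foldl_pick (runs : List (List Int)) (hne : ∀ g ∈ runs, g ≠ []) :
    PySem.List.maxD runs List.length [] = runs.foldl pvPick [] := by
  cases runs with
  | nil => rfl
  | cons h t =>
      have hh : h ≠ [] := hne h (by simp)
      have hp : pvPick [] h = h := by simp [pvPick, List.length_pos_iff, hh]
      simp [PySem.List.maxD, max?_cons_eq, List.foldl, hp]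

-- B's loop never stores an empty run
lemma B_inv : ∀ (l : List Int) (acc : List (List Int)) (cur : Option (List Int)),
    (∀ g ∈ acc, g ≠ []) → cur ≠ some [] →
    (∀ g ∈ (l.foldl pvBstep (acc, cur)).1, g ≠ []) ∧ (l.foldl pvBstep (acc, cur)).2 ≠ some [] := by
  intro l
  induction l with
  | nil => intro acc cur h1 h2; exact ⟨h1, h2⟩
  | cons n t ih =>
      intro acc cur h1 h2
      simp only [List.foldl, pvBstep]
      split_ifs with hp
      · exact ih acc _ h1 (by simp)
      · cases cur with
        | none => exact ih acc none h1 (by simp)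
        | some c =>
            refine ih (acc ++ [c]) none ?_ (by simp)
            intro g hg
            rcases List.mem_append.mp hg with h | h
            · exact h1 g h
            · simp at h; subst h; exact h2 ∘ congrArg some

-- Main invariant: A's running (best, current) state corresponds to B's (completed runs, current run)
lemma main_inv : ∀ (l : List Int) (lmax lact : Int) (smax sact : List Int)
    (acc : List (List Int)) (cur : Option (List Int)),
    lact = sact.length → lmax = smax.length →
    sact = cur.getD [] → smax = acc.foldl pvPick [] →
    (let st := l.foldl pvAstep (lmax, lact, smax, sact)
     if st.2.1 > st.1 then st.2.2.2 else st.2.2.1)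
    = (let st' := l.foldl pvBstep (acc, cur)
       (st'.1 ++ st'.2.toList).foldl pvPick []) := by
  intro l
  induction l with
  | nil =>
      intro lmax lact smax sact acc cur h1 h2 h3 h4
      simp only [List.foldl]
      cases cur with
      | none =>
          simp at h3; subst h3
          simp at h1; subst h1 h2 h4
          simp
      | some c =>
          simp at h3; subst h3
          subst h1 h2 h4
          simp only [Option.toList_some, List.foldl_append, List.foldl]
          simp only [pvPick]
          split_ifs with hA hB hB
          · rfl
          · omega
          · omega
          · rfl
  | cons n t ih =>
      intro lmax lact smax sact acc cur h1 h2 h3 h4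
      simp only [List.foldl]
      by_cases hp : is_palindrome n = true
      · -- palindrome: extend the current run
        rw [show pvAstep (lmax, lact, smax, sact) n = (lmax, lact + 1, smax, sact ++ [n]) from by
              simp [pvAstep, hp],
            show pvBstep (acc, cur) n = (acc, some (cur.getD [] ++ [n])) from by
              simp [pvBstep, hp]]
        refine ih _ _ _ _ acc (some (cur.getD [] ++ [n])) ?_ h2 ?_ h4
        · simp [h1, h3]
        · simp [h3]
      · -- not a palindrome: close the current run
        cases cur with
        | none =>
            simp at h3; subst h3
            simp at h1; subst h1
            have h0 : ¬ ((0:Int) > lmax) := by omega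
            rw [show pvAstep (lmax, 0, smax, []) n = (lmax, 0, smax, []) from by
                  simp [pvAstep, hp, h0],
                show pvBstep (acc, none) n = (acc, none) from by simp [pvBstep, hp]]
            exact ih lmax 0 smax [] acc none rfl h2 rfl h4
        | some c =>
            simp at h3; subst h3
            subst h1 h2 h4
            rw [show pvBstep (acc, some sact) n = (acc ++ [sact], none) from by
                  simp [pvBstep, hp]]
            have hfold : (acc ++ [sact]).foldl pvPick [] = pvPick (acc.foldl pvPick []) sact := by
              simp [List.foldl_append]
            by_cases hlt : (acc.foldl pvPick []).length < sact.length
            · have h0 : ((List.foldl pvPick [] acc).length : Int) < (sact.length : Int) := by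
                exact_mod_cast hlt
              rw [show pvAstep (((List.foldl pvPick [] acc).length : Int), (sact.length : Int),
                    List.foldl pvPick [] acc, sact) n
                    = ((sact.length : Int), 0, sact, ([] : List Int)) from by
                  simp [pvAstep, hp, h0]]
              refine ih _ _ _ _ (acc ++ [sact]) none rfl rfl rfl ?_
              simp [hfold, pvPick, hlt]
            · have h0 : ¬ (((List.foldl pvPick [] acc).length : Int) < (sact.length : Int)) := by
                exact_mod_cast hlt
              rw [show pvAstep (((List.foldl pvPick [] acc).length : Int), (sact.length : Int),
                    List.foldl pvPick [] acc, sact) n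
                    = (((List.foldl pvPick [] acc).length : Int), 0, List.foldl pvPick [] acc,
                       ([] : List Int)) from by
                  simp [pvAstep, hp, h0]]
              refine ih _ _ _ _ (acc ++ [sact]) none rfl rfl rfl ?_
              simp [hfold, pvPick, hlt]

-- ===== VERDICT (by name: the statement is the Claim_ definition above) =====
theorem get_longest_all_palindromes_spec : Claim_equal_get_longest_all_palindromes := by
  intro l _
  unfold Spec_get_longest_all_palindromes get_longest_all_palindromes get_longest_all_palindromes_alt
  have hinv := B_inv l [] none (by simp) (by simp)
  have hne : ∀ g ∈ (l.foldl pvBstep ([], none)).1 ++ (l.foldl pvBstep ([], none)).2.toList, g ≠ [] := by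
    intro g hg
    rcases List.mem_append.mp hg with h | h
    · exact hinv.1 g h
    · cases hcur : (l.foldl pvBstep ([], none)).2 with
      | none => rw [hcur] at h; simp at h
      | some c =>
          rw [hcur] at h; simp at h; subst h
          intro habs; subst habs; exact hinv.2 hcur
  rw [maxD_eq_foldl_pick _ hne]
  exact main_inv l 0 0 [] [] [] none rfl rfl rfl rfl
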